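-- pv_equiv track=rewrite | github.com/AndreaLK3/Multi-sense-LM | GetInputData/RetrieveInputData.py | merge_dicts_withlists
-- ===== SOURCE A (Python) =====
-- def merge_dicts_withlists(all_dicts_ls):
--     merged_dict = {}
--
--     all_keys = []
--     for dict in all_dicts_ls:
--         all_keys.extend(dict.keys())
--
--     for key in all_keys:
--         try:
--             values_lls = [dict[key] for dict in all_dicts_ls]
--         except KeyError:
--             values_lls = [[]]
--         merged_dict[key] = [item for values_ls in values_lls for item in values_ls]
--
--     return merged_dict
-- ===== SOURCE B (Python) =====
-- def merge_dicts_withlists(all_dicts_ls):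
--     n = len(all_dicts_ls)
--     result = {}
--     count = {}
--     for d in all_dicts_ls:
--         for key, vals in d.items():
--             result[key] = result.get(key, []) + vals
--             count[key] = count.get(key, 0) + 1
--     return {key: (vals if count[key] == n else []) for key, vals in result.items()}
-- ===== Notes on version B (the rewrite author's own statement) =====
-- stated objective: alternative
-- what changed: A concatenates all key lists and, for every key occurrence, rescans every dict with a try/except comprehension; B makes one pass over the dicts accumulating each key's concatenated values and a presence count, then blanks keys whose count is below the number of dicts.
import Mathlib
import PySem

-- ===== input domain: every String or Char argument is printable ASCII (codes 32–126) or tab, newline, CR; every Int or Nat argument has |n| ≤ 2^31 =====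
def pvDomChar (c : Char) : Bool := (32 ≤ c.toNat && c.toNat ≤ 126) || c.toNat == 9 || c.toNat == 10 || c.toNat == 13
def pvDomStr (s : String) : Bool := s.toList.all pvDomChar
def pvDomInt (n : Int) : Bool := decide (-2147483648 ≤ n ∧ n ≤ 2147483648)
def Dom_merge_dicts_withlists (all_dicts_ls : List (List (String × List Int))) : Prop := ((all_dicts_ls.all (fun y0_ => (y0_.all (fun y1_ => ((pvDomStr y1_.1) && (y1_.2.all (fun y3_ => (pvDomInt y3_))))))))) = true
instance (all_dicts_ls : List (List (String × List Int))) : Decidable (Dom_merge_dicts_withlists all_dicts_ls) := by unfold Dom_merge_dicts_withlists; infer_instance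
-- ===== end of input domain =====

-- B replaces A's per-key rescan of every dict (the try/except comprehension) by one pass that
-- accumulates each key's concatenated values and a presence count, then blanks keys not present in
-- all dicts (objective: alternative — a differently shaped traversal of the same data).

-- ===== PORT A =====
-- helper: the comprehension [dict[key] for dict in all_dicts_ls]; `none` is exactly Python's
-- KeyError raised at the first dict missing `key` (hand port, exact).
def pvTryGetAll (dicts : List (PySem.Dict String (List Int))) (key : String) :
    Option (List (List Int)) :=
  match dicts with
  | [] => some []
  | d :: rest =>
    match d.get? key with
    | none => none
    | some v =>
      match pvTryGetAll rest key with
      | none => none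
      | some vs => some (v :: vs)

def merge_dicts_withlists (all_dicts_ls : List (List (String × List Int))) : List (String × List Int) :=
  let dicts := all_dicts_ls.map (fun d => PySem.Dict.ofList d)
  let all_keys := dicts.foldl (fun acc d => acc ++ d.keys) []
  let merged := all_keys.foldl (fun m key =>
    let values_lls := match pvTryGetAll dicts key with
      | some lls => lls
      | none => [[]]
    m.insert key values_lls.flatten) PySem.Dict.empty
  merged.items

-- ===== PORT B =====
def merge_dicts_withlists_alt (all_dicts_ls : List (List (String × List Int))) : List (String × List Int) :=
  let n : Int := PySem.List.len all_dicts_ls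
  let rc := all_dicts_ls.foldl
    (fun (rc : PySem.Dict String (List Int) × PySem.Dict String Int) d =>
      (PySem.Dict.ofList d).items.foldl
        (fun rc kv => (rc.1.modify kv.1 [] (· ++ kv.2), rc.2.modify kv.1 0 (· + 1))) rc)
    (PySem.Dict.empty, PySem.Dict.empty)
  rc.1.items.map (fun kv => (kv.1, if rc.2.getD kv.1 0 = n then kv.2 else []))

-- ===== PRECONDITION & SPEC =====
def Spec_merge_dicts_withlists (all_dicts_ls : List (List (String × List Int))) (out : List (String × List Int)) : Prop := out = merge_dicts_withlists_alt all_dicts_ls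
instance (all_dicts_ls : List (List (String × List Int))) (out : List (String × List Int)) : Decidable (Spec_merge_dicts_withlists all_dicts_ls out) := by unfold Spec_merge_dicts_withlists; infer_instance

-- ===== CLAIM (what is proved, stated in full; the proofs are below) =====
def Claim_equal_merge_dicts_withlists : Prop := ∀ (all_dicts_ls : List (List (String × List Int))), Dom_merge_dicts_withlists all_dicts_ls → Spec_merge_dicts_withlists all_dicts_ls (merge_dicts_withlists all_dicts_ls)

-- ===== LEMMAS AND PROOFS =====

-- A's per-key value: concatenation of the key's lists, or [] when some dict misses the key
def pvVal (dicts : List (PySem.Dict String (List Int))) (key : String) : List Int :=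
  (match pvTryGetAll dicts key with
    | some lls => lls
    | none => [[]]).flatten

lemma pvTryGetAll_of_all (dicts : List (PySem.Dict String (List Int))) (k : String)
    (h : dicts.all (fun d => (d.get? k).isSome) = true) :
    pvTryGetAll dicts k = some (dicts.filterMap (fun d => d.get? k)) := by
  induction dicts with
  | nil => rfl
  | cons d rest ih =>
    simp only [List.all_cons, Bool.and_eq_true] at h
    obtain ⟨v, hv⟩ := Option.isSome_iff_exists.mp h.1
    simp [pvTryGetAll, hv, ih h.2]

lemma pvTryGetAll_isSome (dicts : List (PySem.Dict String (List Int))) (k : String) :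
    (pvTryGetAll dicts k).isSome = dicts.all (fun d => (d.get? k).isSome) := by
  induction dicts with
  | nil => rfl
  | cons d rest ih =>
    cases hv : d.get? k with
    | none => simp [pvTryGetAll, hv]
    | some v =>
      cases hr : pvTryGetAll rest k with
      | none => simp [pvTryGetAll, hv, hr, ← ih]
      | some vs => simp [pvTryGetAll, hv, hr, ← ih]

lemma pvVal_eq (dicts : List (PySem.Dict String (List Int))) (k : String) :
    pvVal dicts k =
      if dicts.all (fun d => (d.get? k).isSome) = true
      then (dicts.filterMap (fun d => d.get? k)).flatten else [] := by
  by_cases h : dicts.all (fun d => (d.get? k).isSome) = true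
  · simp [pvVal, pvTryGetAll_of_all dicts k h, h]
  · have : pvTryGetAll dicts k = none := by
      rw [← Option.not_isSome_iff_eq_none, pvTryGetAll_isSome]; exact h
    simp [pvVal, this, h]

-- A's insertion loop: lookups in the merged dict
lemma get?_foldl_insertVal (K : List String) (v : String → List Int)
    (m : PySem.Dict String (List Int)) (k : String) :
    (K.foldl (fun m key => m.insert key (v key)) m).get? k
      = if k ∈ K then some (v k) else m.get? k := by
  induction K generalizing m with
  | nil => simp
  | cons a rest ih =>
    rw [List.foldl_cons, ih]
    by_cases hr : k ∈ rest
    · simp [hr]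
    · rw [PySem.Dict.get?_insert]
      by_cases ha : k = a <;> simp [ha, hr]

-- B's inner loop over one dict's items splits componentwise
lemma pairFold_inner (items : List (String × List Int))
    (rc : PySem.Dict String (List Int) × PySem.Dict String Int) :
    items.foldl (fun rc kv => (rc.1.modify kv.1 [] (· ++ kv.2), rc.2.modify kv.1 0 (· + 1))) rc
      = (items.foldl (fun r kv => r.modify kv.1 [] (· ++ kv.2)) rc.1,
         items.foldl (fun c kv => c.modify kv.1 0 (· + 1)) rc.2) := by
  induction items generalizing rc with
  | nil => rfl
  | cons kv rest ih => simp [List.foldl_cons, ih]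

-- B's outer loop splits componentwise
lemma pairFold_outer (dicts : List (PySem.Dict String (List Int)))
    (rc : PySem.Dict String (List Int) × PySem.Dict String Int) :
    dicts.foldl (fun rc d =>
        d.items.foldl (fun rc kv => (rc.1.modify kv.1 [] (· ++ kv.2), rc.2.modify kv.1 0 (· + 1))) rc) rc
      = (dicts.foldl (fun r d => d.items.foldl (fun r kv => r.modify kv.1 [] (· ++ kv.2)) r) rc.1,
         dicts.foldl (fun c d => d.items.foldl (fun c kv => c.modify kv.1 0 (· + 1)) c) rc.2) := by
  induction dicts generalizing rc with
  | nil => rfl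
  | cons d rest ih => rw [List.foldl_cons, List.foldl_cons, List.foldl_cons, pairFold_inner, ih]

lemma getD_innerRes (items : List (String × List Int)) (r : PySem.Dict String (List Int)) (k : String) :
    (items.foldl (fun r kv => r.modify kv.1 [] (· ++ kv.2)) r).getD k []
      = r.getD k [] ++ ((items.filter (fun p => p.1 == k)).map Prod.snd).flatten := by
  induction items generalizing r with
  | nil => simp
  | cons p rest ih =>
    rw [List.foldl_cons, ih, PySem.Dict.getD_modify]
    by_cases h : k = p.1
    · simp [h, List.append_assoc]
    · have : (p.1 == k) = false := by simp [Ne.symm h]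
      simp [this, h]

lemma filterItems_get? (d : PySem.Dict String (List Int)) (h : d.keys.Nodup) (k : String) :
    ((d.items.filter (fun p => p.1 == k)).map Prod.snd).flatten = (d.get? k).getD [] := by
  obtain ⟨l⟩ := d
  simp only [PySem.Dict.keys] at h ⊢
  induction l with
  | nil => simp [PySem.Dict.get?]
  | cons p rest ih =>
    obtain ⟨p1, p2⟩ := p
    simp only [List.map_cons, List.nodup_cons] at h
    rw [PySem.Dict.get?_mk_cons]
    by_cases hk : p1 = k
    · subst hk
      have : rest.filter (fun p => p.1 == p1) = [] := by
        rw [List.filter_eq_nil_iff]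
        intro q hq hq1
        have hq1' : q.1 = p1 := by simpa using hq1
        exact h.1 (hq1' ▸ List.mem_map_of_mem (f := Prod.fst) hq)
      simp [this]
    · have hne : (p1 == k) = false := by simp [hk]
      simp only [List.filter_cons, hne, Bool.false_eq_true, if_false]
      exact ih h.2

lemma getD_res (dicts : List (PySem.Dict String (List Int))) (r : PySem.Dict String (List Int))
    (k : String) (hnd : ∀ d ∈ dicts, d.keys.Nodup) :
    (dicts.foldl (fun r d => d.items.foldl (fun r kv => r.modify kv.1 [] (· ++ kv.2)) r) r).getD k []
      = r.getD k [] ++ (dicts.filterMap (fun d => d.get? k)).flatten := by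
  induction dicts generalizing r with
  | nil => simp
  | cons d rest ih =>
    rw [List.foldl_cons, ih _ (fun d hd => hnd d (List.mem_cons_of_mem _ hd)),
        getD_innerRes, filterItems_get? d (hnd d List.mem_cons_self) k]
    cases hv : d.get? k <;> simp [hv, List.append_assoc]

lemma getD_cnt (dicts : List (PySem.Dict String (List Int))) (c : PySem.Dict String Int)
    (k : String) (hnd : ∀ d ∈ dicts, d.keys.Nodup) :
    (dicts.foldl (fun c d => d.items.foldl (fun c kv => c.modify kv.1 0 (· + 1)) c) c).getD k 0
      = c.getD k 0 + (dicts.countP (fun d => decide (k ∈ d.keys)) : Int) := by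
  induction dicts generalizing c with
  | nil => simp
  | cons d rest ih =>
    rw [List.foldl_cons, ih _ (fun d hd => hnd d (List.mem_cons_of_mem _ hd))]
    have hinner : (d.items.foldl (fun c kv => c.modify kv.1 0 (· + 1)) c).getD k 0
        = c.getD k 0 + (d.keys.count k : Int) := by
      rw [show d.items.foldl (fun c kv => c.modify kv.1 0 (· + 1)) c
            = (d.items.map Prod.fst).foldl (fun c x => c.modify x 0 (· + 1)) c by
          rw [List.foldl_map]]
      exact PySem.Dict.getD_foldl_modify_add_one _ _ _
    rw [hinner]
    have hcount : (d.keys.count k : Int) = (if k ∈ d.keys then 1 else 0) := by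
      by_cases hm : k ∈ d.keys
      · rw [List.count_eq_one_of_mem (hnd d List.mem_cons_self) hm]; simp [hm]
      · rw [List.count_eq_zero_of_not_mem hm]; simp [hm]
    rw [List.countP_cons, hcount]
    by_cases hm : k ∈ d.keys <;> simp [hm]
    ring

-- B's accumulated keys are the ordered dedup of the concatenated key lists
lemma keys_res (dicts : List (PySem.Dict String (List Int))) (r : PySem.Dict String (List Int)) :
    (dicts.foldl (fun r d => d.items.foldl (fun r kv => r.modify kv.1 [] (· ++ kv.2)) r) r).keys
      = PySem.Set.update r.keys (dicts.flatMap PySem.Dict.keys) := by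
  induction dicts generalizing r with
  | nil => rfl
  | cons d rest ih =>
    rw [List.foldl_cons, ih,
        PySem.Dict.keys_foldl_modify_key d.items Prod.fst [] (fun _ kv v => v ++ kv.2) r]
    show PySem.Set.update (PySem.Set.update r.keys (d.items.map Prod.fst)) _ = _
    simp only [PySem.Set.update, List.flatMap_cons, List.foldl_append]
    rfl

lemma nodup_keys_of_mem (all_dicts_ls : List (List (String × List Int)))
    (d : PySem.Dict String (List Int))
    (hd : d ∈ all_dicts_ls.map (fun d => PySem.Dict.ofList d)) : d.keys.Nodup := by
  obtain ⟨l, _, rfl⟩ := List.mem_map.mp hd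
  exact PySem.Dict.nodup_keys_ofList l

-- A's port in closed form: ordered-dedup keys, each paired with pvVal
lemma A_eq (all_dicts_ls : List (List (String × List Int))) :
    merge_dicts_withlists all_dicts_ls
      = (PySem.Set.update ([] : List String)
          ((all_dicts_ls.map (fun d => PySem.Dict.ofList d)).flatMap PySem.Dict.keys)).map
          (fun k => (k, pvVal (all_dicts_ls.map (fun d => PySem.Dict.ofList d)) k)) := by
  set dicts := all_dicts_ls.map (fun d => PySem.Dict.ofList d) with hdicts
  have hbody : merge_dicts_withlists all_dicts_ls
      = ((dicts.foldl (fun acc d => acc ++ d.keys) []).foldl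
          (fun m key => m.insert key (pvVal dicts key)) PySem.Dict.empty).items := rfl
  have hK : dicts.foldl (fun acc d => acc ++ d.keys) [] = dicts.flatMap PySem.Dict.keys := by
    simpa using PySem.List.foldl_append_eq_flatMap PySem.Dict.keys dicts []
  rw [hbody, hK]
  have hkeys := PySem.Dict.keys_foldl_insert (dicts.flatMap PySem.Dict.keys)
    (fun _ key => pvVal dicts key) (PySem.Dict.empty (κ := String) (ν := List Int))
  have hnodup : ((dicts.flatMap PySem.Dict.keys).foldl
      (fun m key => m.insert key (pvVal dicts key)) PySem.Dict.empty).keys.Nodup := by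
    rw [hkeys, PySem.Dict.keys_empty]
    exact PySem.Set.nodup_update _ _ List.nodup_nil
  rw [PySem.Dict.items_eq_map_keys _ hnodup [], hkeys, PySem.Dict.keys_empty]
  apply List.map_congr_left
  intro k hk
  have hkK : k ∈ dicts.flatMap PySem.Dict.keys := by
    rcases (PySem.Set.mem_update [] _ k).mp hk with h | h
    · exact absurd h (List.not_mem_nil)
    · exact h
  rw [PySem.Dict.getD_eq_get?_getD, get?_foldl_insertVal, if_pos hkK]
  rfl

-- membership in a dict's keys is exactly a successful lookup
lemma mem_keys_iff_isSome (d : PySem.Dict String (List Int)) (k : String) :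
    k ∈ d.keys ↔ (d.get? k).isSome = true := by
  rw [← PySem.Dict.contains_iff_mem_keys, PySem.Dict.contains_eq_isSome_get?]

-- B's port in closed form: same keys, each paired with its accumulated value (blanked if not
-- present in every dict)
lemma B_eq (all_dicts_ls : List (List (String × List Int))) :
    merge_dicts_withlists_alt all_dicts_ls
      = (PySem.Set.update ([] : List String)
          ((all_dicts_ls.map (fun d => PySem.Dict.ofList d)).flatMap PySem.Dict.keys)).map
          (fun k => (k, pvVal (all_dicts_ls.map (fun d => PySem.Dict.ofList d)) k)) := by
  set dicts := all_dicts_ls.map (fun d => PySem.Dict.ofList d) with hdicts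
  have hnd : ∀ d ∈ dicts, d.keys.Nodup := nodup_keys_of_mem all_dicts_ls
  have hbody : merge_dicts_withlists_alt all_dicts_ls
      = (dicts.foldl (fun rc d =>
            d.items.foldl (fun rc kv =>
              (rc.1.modify kv.1 [] (· ++ kv.2), rc.2.modify kv.1 0 (· + 1))) rc)
          ((PySem.Dict.empty : PySem.Dict String (List Int)),
           (PySem.Dict.empty : PySem.Dict String Int))).1.items.map
          (fun kv => (kv.1,
            if (dicts.foldl (fun rc d =>
                  d.items.foldl (fun rc kv =>
                    (rc.1.modify kv.1 [] (· ++ kv.2), rc.2.modify kv.1 0 (· + 1))) rc)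
                ((PySem.Dict.empty : PySem.Dict String (List Int)),
                 (PySem.Dict.empty : PySem.Dict String Int))).2.getD kv.1 0 = PySem.List.len all_dicts_ls
            then kv.2 else [])) := by
    rw [merge_dicts_withlists_alt, hdicts, List.foldl_map]
  rw [hbody, pairFold_outer]
  dsimp only
  have hkeys : (dicts.foldl
      (fun r d => d.items.foldl (fun r kv => r.modify kv.1 [] (· ++ kv.2)) r)
      PySem.Dict.empty).keys
      = PySem.Set.update ([] : List String) (dicts.flatMap PySem.Dict.keys) := by
    rw [keys_res, PySem.Dict.keys_empty]
  have hnodup : (dicts.foldl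
      (fun r d => d.items.foldl (fun r kv => r.modify kv.1 [] (· ++ kv.2)) r)
      PySem.Dict.empty).keys.Nodup := by
    rw [hkeys]; exact PySem.Set.nodup_update _ _ List.nodup_nil
  rw [PySem.Dict.items_eq_map_keys _ hnodup [], hkeys, List.map_map]
  apply List.map_congr_left
  intro k _
  simp only [Function.comp]
  rw [getD_cnt dicts PySem.Dict.empty k hnd, getD_res dicts PySem.Dict.empty k hnd,
      PySem.Dict.getD_empty, PySem.Dict.getD_empty, List.nil_append, pvVal_eq]
  have hn : PySem.List.len all_dicts_ls = (dicts.length : Int) := by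
    rw [PySem.List.len_eq, hdicts, List.length_map]
  rw [hn]
  by_cases hall : dicts.all (fun d => (d.get? k).isSome) = true
  · have hcp : dicts.countP (fun d => decide (k ∈ d.keys)) = dicts.length := by
      rw [List.countP_eq_length]
      intro d hd
      exact decide_eq_true ((mem_keys_iff_isSome d k).mpr
        (by simpa using List.all_eq_true.mp hall d hd))
    simp [hcp, hall]
  · have hcp : dicts.countP (fun d => decide (k ∈ d.keys)) ≠ dicts.length := by
      intro hc
      exact hall (List.all_eq_true.mpr (fun d hd =>
        (mem_keys_iff_isSome d k).mp (of_decide_eq_true (List.countP_eq_length.mp hc d hd))))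
    have : ((dicts.countP (fun d => decide (k ∈ d.keys)) : Int))
        ≠ ((dicts.length : Int)) := by exact_mod_cast hcp
    simp [this, hall]

-- ===== VERDICT (by name: the statement is the Claim_ definition above) =====
theorem merge_dicts_withlists_spec : Claim_equal_merge_dicts_withlists := by
  intro all_dicts_ls _
  show merge_dicts_withlists all_dicts_ls = merge_dicts_withlists_alt all_dicts_ls
  rw [A_eq, B_eq]
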